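-- pv_equiv track=rewrite | github.com/Xnkr/NLP-Project | CNN-Twisted-Minds-Local.py | clean_sentence
-- ===== SOURCE A (Python) =====
-- def clean_sentence(sentence:str):
--     sentence = sentence.replace("'", " '")
--     sentence = sentence.replace("<e1>", " <e1> ")
--     sentence = sentence.replace("</e1>", " </e1> ")
--     sentence = sentence.replace("<e2>", " <e2> ")
--     sentence = sentence.replace("</e2>", " </e2> ")
--     for ch in '.!"#$%&()*+,-:;=?@[\]^_`{|}~':
--         if ch in sentence:
--             sentence = sentence.replace(ch, " {} ".format(ch))
--
--     sentence.strip()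
--     return sentence
-- ===== SOURCE B (Python) =====
-- _PUNCT = '.!"#$%&()*+,-:;=?@[\]^_`{|}~'
-- _TABLE = str.maketrans({ch: ' ' + ch + ' ' for ch in _PUNCT})
--
-- def clean_sentence(sentence: str):
--     sentence = sentence.replace("'", " '")
--     sentence = sentence.replace("<e1>", " <e1> ")
--     sentence = sentence.replace("</e1>", " </e1> ")
--     sentence = sentence.replace("<e2>", " <e2> ")
--     sentence = sentence.replace("</e2>", " </e2> ")
--     return sentence.translate(_TABLE)
-- ===== Notes on version B (the rewrite author's own statement) =====
-- stated objective: idiomatic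
-- what changed: The loop of up to 27 guarded str.replace passes over the whole string is replaced by one str.translate pass using a translation table built once; the dead strip statement whose result A discards is dropped.
import Mathlib
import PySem

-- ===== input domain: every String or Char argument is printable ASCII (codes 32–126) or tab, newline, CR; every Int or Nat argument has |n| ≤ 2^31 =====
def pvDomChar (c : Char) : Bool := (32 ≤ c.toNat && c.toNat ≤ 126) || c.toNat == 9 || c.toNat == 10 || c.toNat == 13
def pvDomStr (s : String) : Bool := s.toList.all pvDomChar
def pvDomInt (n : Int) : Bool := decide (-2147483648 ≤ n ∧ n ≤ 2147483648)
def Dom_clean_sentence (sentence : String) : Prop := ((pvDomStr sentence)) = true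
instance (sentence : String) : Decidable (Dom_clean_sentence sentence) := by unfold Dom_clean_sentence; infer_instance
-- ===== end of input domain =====

-- B replaces A's loop of up to 27 guarded per-character str.replace passes by one
-- single-pass str.translate with a table built once (idiomatic; A's dead
-- strip statement, whose result is discarded, is dropped).

-- ===== PORT A =====
def clean_sentence (sentence : String) : String :=
  let s1 := PySem.Str.replace sentence "'" " '"
  let s2 := PySem.Str.replace s1 "<e1>" " <e1> "
  let s3 := PySem.Str.replace s2 "</e1>" " </e1> "
  let s4 := PySem.Str.replace s3 "<e2>" " <e2> "
  let s5 := PySem.Str.replace s4 "</e2>" " </e2> "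
  -- for ch in '.!"#$%&()*+,-:;=?@[\]^_`{|}~': if ch in sentence: sentence = sentence.replace(ch, " {} ".format(ch))
  let s6 := (".!\"#$%&()*+,-:;=?@[\\]^_`{|}~".toList).foldl
    (fun acc ch =>
      if PySem.Str.isIn (String.ofList [ch]) acc then
        PySem.Str.replace acc (String.ofList [ch]) (String.ofList [' ', ch, ' '])
      else acc) s5
  -- A's final strip statement computes a value that is discarded; no effect on the result
  s6

-- ===== PORT B =====
-- _PUNCT = '.!"#$%&()*+,-:;=?@[\]^_`{|}~'
def pvPunctB : List Char := ".!\"#$%&()*+,-:;=?@[\\]^_`{|}~".toList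

-- _TABLE = str.maketrans({ch: ' ' + ch + ' ' for ch in _PUNCT}): per-character lookup table
def pvTableB (ch : Char) : List Char := if ch ∈ pvPunctB then [' ', ch, ' '] else [ch]

-- sentence.translate(_TABLE): one pass, each code point mapped through the table
-- (PySem has no translate; ported by hand, exact for this table of char → string)
def clean_sentence_alt (sentence : String) : String :=
  let s1 := PySem.Str.replace sentence "'" " '"
  let s2 := PySem.Str.replace s1 "<e1>" " <e1> "
  let s3 := PySem.Str.replace s2 "</e1>" " </e1> "
  let s4 := PySem.Str.replace s3 "<e2>" " <e2> "
  let s5 := PySem.Str.replace s4 "</e2>" " </e2> "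
  String.ofList (s5.toList.flatMap pvTableB)

-- ===== PRECONDITION & SPEC =====
def Spec_clean_sentence (sentence : String) (out : String) : Prop := out = clean_sentence_alt sentence
instance (sentence : String) (out : String) : Decidable (Spec_clean_sentence sentence out) := by unfold Spec_clean_sentence; infer_instance

-- ===== CLAIM (what is proved, stated in full; the proofs are below) =====
def Claim_equal_clean_sentence : Prop := ∀ (sentence : String), Dom_clean_sentence sentence → Spec_clean_sentence sentence (clean_sentence sentence)

-- ===== LEMMAS AND PROOFS =====

-- A's loop body, on the list-of-chars side
def pvStepC (l : List Char) (c : Char) : List Char :=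
  if PySem.Chars.isIn [c] l then PySem.Chars.replace l [c] [' ', c, ' '] else l

-- replace.go for a single-character pattern, fuel = length of the remaining list
theorem pv_go_single (c : Char) (new : List Char) :
    ∀ (l acc : List Char),
      PySem.Chars.replace.go [c] new l.length l acc
        = acc.reverse ++ l.flatMap (fun x => if x = c then new else [x]) := by
  intro l
  induction l with
  | nil => intro acc; simp [PySem.Chars.replace.go]
  | cons c' t ih =>
    intro acc
    by_cases h : c' = c
    · subst h
      simp [PySem.Chars.replace.go, List.isPrefixOf, ih]
    · have hbeq : (c == c') = false := beq_eq_false_iff_ne.mpr (Ne.symm h)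
      simp [PySem.Chars.replace.go, List.isPrefixOf, hbeq, ih, h]

-- replace with a single-character pattern is a per-character expansion
theorem pv_replace_single (l : List Char) (c : Char) (new : List Char) :
    PySem.Chars.replace l [c] new = l.flatMap (fun x => if x = c then new else [x]) := by
  simpa [PySem.Chars.replace] using pv_go_single c new l []

-- a char absent from the list is expanded to nothing: the pass is the identity
theorem pv_flatMap_id (c : Char) (new : List Char) :
    ∀ l : List Char, c ∉ l → l.flatMap (fun x => if x = c then new else [x]) = l := by
  intro l
  induction l with
  | nil => intro _; simp
  | cons a t iht =>
    intro hmem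
    have ha : a ≠ c := fun he => hmem (he ▸ List.mem_cons_self)
    simp only [List.flatMap_cons, if_neg ha, List.singleton_append]
    rw [iht (fun hc => hmem (List.mem_cons_of_mem a hc))]

-- both branches of A's guarded step are the same per-character expansion
theorem pv_stepC_eq (l : List Char) (c : Char) :
    pvStepC l c = l.flatMap (fun x => if x = c then [' ', c, ' '] else [x]) := by
  unfold pvStepC
  by_cases h : PySem.Chars.isIn [c] l = true
  · rw [if_pos h, pv_replace_single]
  · rw [if_neg h]
    have hmem : c ∉ l := by
      intro hc
      exact h ((PySem.Chars.isIn_iff_infix [c] l).mpr ((List.singleton_infix_iff c l).mpr hc))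
    exact (pv_flatMap_id c [' ', c, ' '] l hmem).symm

-- the whole loop, for a duplicate-free space-free character list, is one translate pass
theorem pv_loop_eq (ps : List Char) (hnd : ps.Nodup) (hsp : ' ' ∉ ps) :
    ∀ l : List Char,
      ps.foldl pvStepC l = l.flatMap (fun x => if x ∈ ps then [' ', x, ' '] else [x]) := by
  induction ps with
  | nil => intro l; simp
  | cons c ps ih =>
    intro l
    have hnd' : ps.Nodup := hnd.of_cons
    have hcps : c ∉ ps := (List.nodup_cons.mp hnd).1
    have hsp' : ' ' ∉ ps := fun h => hsp (List.mem_cons_of_mem c h)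
    rw [List.foldl_cons, ih hnd' hsp', pv_stepC_eq, List.flatMap_assoc]
    apply List.flatMap_congr
    intro x _
    by_cases hx : x = c
    · subst hx
      simp [hcps, hsp']
    · simp [hx]

-- A's Str-level loop projects to the Chars-level loop
theorem pv_foldl_toList (ps : List Char) :
    ∀ s : String,
      ((ps.foldl (fun acc ch =>
          if PySem.Str.isIn (String.ofList [ch]) acc then
            PySem.Str.replace acc (String.ofList [ch]) (String.ofList [' ', ch, ' '])
          else acc) s)).toList
        = ps.foldl pvStepC s.toList := by
  induction ps with
  | nil => intro s; simp
  | cons c ps ih =>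
    intro s
    rw [List.foldl_cons, List.foldl_cons, ih]
    congr 1
    unfold pvStepC
    by_cases h : PySem.Chars.isIn [c] s.toList = true
    · rw [if_pos (by simpa [PySem.Str.isIn] using h), if_pos h]
      simp [PySem.Str.replace]
    · rw [if_neg (by simpa [PySem.Str.isIn] using h), if_neg h]

-- the punctuation list has no duplicates and no space
theorem pv_punct_nodup : (".!\"#$%&()*+,-:;=?@[\\]^_`{|}~".toList).Nodup := by decide
theorem pv_punct_nosp : ' ' ∉ ".!\"#$%&()*+,-:;=?@[\\]^_`{|}~".toList := by decide

-- ===== VERDICT (by name: the statement is the Claim_ definition above) =====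
theorem clean_sentence_spec : Claim_equal_clean_sentence := by
  intro sentence _
  unfold Spec_clean_sentence clean_sentence clean_sentence_alt
  apply String.toList_inj.mp
  rw [pv_foldl_toList, pv_loop_eq _ pv_punct_nodup pv_punct_nosp]
  simp only [String.toList_ofList]
  exact List.flatMap_congr (fun x _ => by simp [pvTableB, pvPunctB])
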